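-- pv_equiv track=rewrite | github.com/pypi-data/pypi-mirror-114 | packages/teamaker/teamaker-0.0.1.tar.gz/teamaker-0.0.1/teamaker/gameengine.py | _get_dict_value_for_file_contents
-- ===== SOURCE A (Python) =====
-- from typing import Any, Callable, Union, NewType
-- from typing import List, Dict, Set, Tuple, Iterable
--
-- Scene = Dict[str, Any]
--
-- def _get_dict_value_for_file_contents(d: Scene,
--                                       file_contents: str,
--                                       default=None) -> Any:
--     result = default
--     # Iterate in reverse order: if there's a default transition '', check it last
--     for key, value in reversed(sorted(list(d.items()))):
--         if file_contents.endswith(key):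
--             result = value
--             break
--
--     return result
-- ===== SOURCE B (Python) =====
-- def _get_dict_value_for_file_contents(d, file_contents, default=None):
--     # Collect the keys that file_contents ends with and return the value of the
--     # lexicographically largest one, instead of sorting all items and scanning
--     # them in reverse for the first match.
--     matches = [k for k in d if file_contents.endswith(k)]
--     if matches:
--         return d[max(matches)]
--     return default
-- ===== Notes on version B (the rewrite author's own statement) =====
-- stated objective: faster
-- what changed: B filters the dict's keys down to those file_contents ends with and returns the value of the lexicographically largest match via one dict lookup, instead of sorting all items and scanning them in reverse for the first key the string ends with; Pre_ excludes association lists with duplicate keys, which cannot arise from a Python dict and on which the two strategies' tie-breaks are both accidental.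
import Mathlib
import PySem

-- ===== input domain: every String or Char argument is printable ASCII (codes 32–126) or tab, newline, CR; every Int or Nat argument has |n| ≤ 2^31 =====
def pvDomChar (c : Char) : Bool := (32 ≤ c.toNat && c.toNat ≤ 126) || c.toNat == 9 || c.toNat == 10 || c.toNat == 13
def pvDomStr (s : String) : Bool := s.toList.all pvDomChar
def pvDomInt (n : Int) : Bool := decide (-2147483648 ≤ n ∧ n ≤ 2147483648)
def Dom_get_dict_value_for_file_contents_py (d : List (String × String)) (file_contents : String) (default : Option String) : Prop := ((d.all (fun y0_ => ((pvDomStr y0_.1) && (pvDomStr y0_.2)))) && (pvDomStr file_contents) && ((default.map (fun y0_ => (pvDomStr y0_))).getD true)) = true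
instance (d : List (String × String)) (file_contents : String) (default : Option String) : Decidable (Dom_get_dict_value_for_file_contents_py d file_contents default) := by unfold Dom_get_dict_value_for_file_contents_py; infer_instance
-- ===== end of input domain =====

-- B replaces A's sort-all-items-then-scan-in-reverse by filtering the keys that
-- file_contents ends with and looking up the lexicographically largest one.

-- ===== PORT A =====
-- the 'for key, value in …: if …: result = value; break' loop, result initialised to default
def gdLoopA (fc : String) : List (String × String) → Option String → Option String
  | [], result => result
  | (k, v) :: rest, result =>
      if PySem.Str.endswith fc k then some v else gdLoopA fc rest result

def get_dict_value_for_file_contents_py (d : List (String × String)) (file_contents : String) (default : Option String) : Option String :=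
  -- reversed(sorted(list(d.items()))) : pairs sorted by tuple comparison, then reversed
  gdLoopA file_contents ((PySem.List.sorted2 d (fun kv => kv.1) (fun kv => kv.2)).reverse) default

-- ===== PORT B =====
def get_dict_value_for_file_contents_py_alt (d : List (String × String)) (file_contents : String) (default : Option String) : Option String :=
  -- '[k for k in d if file_contents.endswith(k)]' : iterate the keys, keep the matching ones
  let mlist := (d.map (fun kv => kv.1)).filter (fun k => PySem.Str.endswith file_contents k)
  match PySem.List.max? mlist (fun s => s) with
  | some m => (d.find? (fun kv => kv.1 == m)).map (fun kv => kv.2)   -- d[max(matches)]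
  | none => default

-- ===== PRECONDITION & SPEC =====
-- Pre_ excludes association lists with duplicate keys: they cannot arise from a Python dict,
-- and on them the two strategies' tie-breaks (largest value vs first stored value) are both accidental.
def Pre_get_dict_value_for_file_contents_py (d : List (String × String)) (file_contents : String) (default : Option String) : Prop :=
  (d.map (fun kv => kv.1)).Nodup
instance (d : List (String × String)) (file_contents : String) (default : Option String) : Decidable (Pre_get_dict_value_for_file_contents_py d file_contents default) := by unfold Pre_get_dict_value_for_file_contents_py; infer_instance

def pvWitness_get_dict_value_for_file_contents_py : (List (String × String)) × String × Option String :=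
  ([("a", "x"), ("ba", "y")], "cba", some "z")

def Spec_get_dict_value_for_file_contents_py (d : List (String × String)) (file_contents : String) (default : Option String) (out : Option String) : Prop := out = get_dict_value_for_file_contents_py_alt d file_contents default
instance (d : List (String × String)) (file_contents : String) (default : Option String) (out : Option String) : Decidable (Spec_get_dict_value_for_file_contents_py d file_contents default out) := by unfold Spec_get_dict_value_for_file_contents_py; infer_instance

-- ===== CLAIM (what is proved, stated in full; the proofs are below) =====
def Claim_equal_get_dict_value_for_file_contents_py : Prop := ∀ (d : List (String × String)) (file_contents : String) (default : Option String), Dom_get_dict_value_for_file_contents_py d file_contents default → Pre_get_dict_value_for_file_contents_py d file_contents default → Spec_get_dict_value_for_file_contents_py d file_contents default (get_dict_value_for_file_contents_py d file_contents default)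

-- ===== LEMMAS AND PROOFS =====

-- A's loop is find? over the list, defaulting to its initial result
theorem gdLoopA_eq_find? (fc : String) (l : List (String × String)) (res : Option String) :
    gdLoopA fc l res =
      match l.find? (fun kv => PySem.Str.endswith fc kv.1) with
      | some kv => some kv.2
      | none => res := by
  induction l with
  | nil => rfl
  | cons kv rest ih =>
      obtain ⟨k, v⟩ := kv
      simp only [gdLoopA, List.find?, PySem.Str.endswith_eq] at *
      rcases Bool.eq_false_or_eq_true (PySem.Chars.endswith fc.toList k.toList) with h | h <;>
        simp [h, ih]

theorem insertBy_congr {α : Type} (b b' : α → α → Bool) (x : α) (ys : List α)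
    (h : ∀ y ∈ ys, b x y = b' x y) :
    PySem.List.insertBy b x ys = PySem.List.insertBy b' x ys := by
  induction ys with
  | nil => rfl
  | cons y ys ih =>
      have hxy : b x y = b' x y := h y (by simp)
      simp only [PySem.List.insertBy, hxy]
      split
      · rfl
      · simp only [List.cons.injEq, true_and]
        exact ih (fun z hz => h z (by simp [hz]))

-- the two comparison predicates used by sorted2 / sorted
def gdB2 (a b : String × String) : Bool :=
  decide (a.1 < b.1) || (!decide (b.1 < a.1) && decide (a.2 < b.2))
def gdB1 (a b : String × String) : Bool := decide (a.1 < b.1)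

theorem gdB2_eq_gdB1 (a b : String × String) (h : a.1 ≠ b.1) : gdB2 a b = gdB1 a b := by
  unfold gdB2 gdB1
  rcases lt_trichotomy a.1 b.1 with h1 | h1 | h1
  · simp [h1]
  · exact absurd h1 h
  · simp [h1, not_lt_of_gt h1]

theorem gd_foldl_insert_eq (rest : List (String × String)) :
    ∀ (pre acc : List (String × String)), (∀ y ∈ acc, y ∈ pre) →
    ((pre ++ rest).map (fun kv => kv.1)).Nodup →
    rest.foldl (fun acc x => PySem.List.insertBy gdB2 x acc) acc =
      rest.foldl (fun acc x => PySem.List.insertBy gdB1 x acc) acc := by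
  induction rest with
  | nil => intro _ _ _ _; rfl
  | cons x rest ih =>
      intro pre acc hsub hnd
      have hx : ∀ y ∈ acc, gdB2 x y = gdB1 x y := by
        intro y hy
        apply gdB2_eq_gdB1
        intro hkey
        have hxm : x ∈ pre ++ x :: rest := by simp
        have hym : y ∈ pre ++ x :: rest := by simp [hsub y hy]
        have hxy : y = x := List.inj_on_of_nodup_map hnd hym hxm hkey.symm
        have hnd' : (pre ++ x :: rest).Nodup := hnd.of_map
        rw [List.nodup_append] at hnd'
        exact hnd'.2.2 x (hsub x (hxy ▸ hy)) x (by simp) rfl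
      simp only [List.foldl_cons]
      rw [insertBy_congr gdB2 gdB1 x acc hx]
      apply ih (pre ++ [x])
      · intro y hy
        rcases (PySem.List.mem_insertBy gdB1 x y acc).mp hy with h | h
        · simp [h]
        · simp [hsub y h]
      · simpa using hnd

-- sorted2 by the (key, value) pair equals sorted by the key alone when keys are distinct
theorem gd_sorted2_eq_sorted (d : List (String × String))
    (hnd : (d.map (fun kv => kv.1)).Nodup) :
    PySem.List.sorted2 d (fun kv => kv.1) (fun kv => kv.2) =
      PySem.List.sorted d (fun kv => kv.1) := by
  show d.foldl (fun acc x => PySem.List.insertBy gdB2 x acc) [] =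
      d.foldl (fun acc x => PySem.List.insertBy gdB1 x acc) []
  exact gd_foldl_insert_eq d [] [] (by simp) (by simpa using hnd)

-- membership in B's 'matches' list
theorem gd_mem_matches (d : List (String × String)) (fc : String) (s : String) :
    s ∈ ((d.map (fun kv => kv.1)).filter (fun k => PySem.Str.endswith fc k)) ↔
      ((∃ kv ∈ d, kv.1 = s) ∧ PySem.Str.endswith fc s = true) := by
  rw [List.mem_filter, List.mem_map]

-- first-match lookup in a nodup-key list at the key of a member returns that member
theorem gd_find?_lookup (d : List (String × String)) (p : String × String)
    (hnd : (d.map (fun kv => kv.1)).Nodup) (hp : p ∈ d) :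
    d.find? (fun kv => kv.1 == p.1) = some p := by
  have hne : d.find? (fun kv => kv.1 == p.1) ≠ none := by
    intro hcon
    rw [List.find?_eq_none] at hcon
    exact hcon p hp (by simp)
  obtain ⟨q, hq⟩ := Option.ne_none_iff_exists'.mp hne
  have hqmem : q ∈ d := List.mem_of_find?_eq_some hq
  have hqkey : q.1 = p.1 := by
    have := List.find?_some hq
    simpa [beq_iff_eq] using this
  rw [hq]
  congr 1
  exact List.inj_on_of_nodup_map hnd hqmem hp hqkey

-- ===== VERDICT (by name: the statement is the Claim_ definition above) =====
theorem get_dict_value_for_file_contents_py_spec : Claim_equal_get_dict_value_for_file_contents_py := by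
  intro d fc default _hdom hpre
  unfold Spec_get_dict_value_for_file_contents_py
  unfold get_dict_value_for_file_contents_py get_dict_value_for_file_contents_py_alt
  rw [gd_sorted2_eq_sorted d hpre, gdLoopA_eq_find?]
  set rs := PySem.List.sorted d (fun kv => kv.1) with hrs
  have hperm : rs.Perm d := PySem.List.sorted_perm d _ _
  have hpair : rs.reverse.Pairwise (fun a b => b.1 ≤ a.1) := by
    rw [List.pairwise_reverse]
    exact PySem.List.sorted_pairwise d (fun kv => kv.1)
  set ms := ((d.map (fun kv => kv.1)).filter (fun k => PySem.Str.endswith fc k)) with hms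
  cases hfind : rs.reverse.find? (fun kv => PySem.Str.endswith fc kv.1) with
  | none =>
      have hnone : ∀ q ∈ d, ¬ (PySem.Str.endswith fc q.1 = true) := by
        intro q hq
        have hq' : q ∈ rs.reverse := by
          rw [List.mem_reverse]
          exact hperm.mem_iff.mpr hq
        exact by simpa using List.find?_eq_none.mp hfind q hq'
      have hempty : ms = [] := by
        rw [List.eq_nil_iff_forall_not_mem]
        intro s hs
        rw [hms, gd_mem_matches] at hs
        obtain ⟨⟨kv, hkv, hkey⟩, hsend⟩ := hs
        exact hnone kv hkv (hkey ▸ hsend)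
      rw [hempty]
      rfl
  | some p =>
      obtain ⟨hP, as, bs, hsplit, hmiss⟩ := List.find?_eq_some_iff_append.mp hfind
      have hpmem : p ∈ d := by
        have : p ∈ rs.reverse := by rw [hsplit]; simp
        rw [List.mem_reverse] at this
        exact hperm.mem_iff.mp this
      -- A's chosen pair has the maximal key among pairs whose key is a suffix
      have hmax : ∀ q ∈ d, PySem.Str.endswith fc q.1 = true → q.1 ≤ p.1 := by
        intro q hq hqP
        have hq' : q ∈ rs.reverse := by
          rw [List.mem_reverse]; exact hperm.mem_iff.mpr hq
        rw [hsplit] at hq' hpair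
        rcases List.mem_append.mp hq' with h | h
        · exact absurd hqP (by simpa using hmiss q h)
        · rcases List.mem_cons.mp h with h | h
          · exact le_of_eq (by rw [h])
          · exact (List.pairwise_cons.mp (List.pairwise_append.mp hpair).2.1).1 q h
      -- p.1 is in B's matches
      have hp1 : p.1 ∈ ms := by
        rw [hms, gd_mem_matches]
        exact ⟨⟨p, hpmem, rfl⟩, hP⟩
      cases hmx : PySem.List.max? ms (fun s => s) with
      | none =>
          rw [PySem.List.max?_eq_none_iff] at hmx
          rw [hmx] at hp1
          exact absurd hp1 (List.not_mem_nil)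
      | some m =>
          have hmmem : m ∈ ms := PySem.List.max?_mem hmx
          have hmge : p.1 ≤ m := PySem.List.max?_isMax hmx p.1 hp1
          have hmle : m ≤ p.1 := by
            rw [hms, gd_mem_matches] at hmmem
            obtain ⟨⟨kv, hkv, hkey⟩, hsend⟩ := hmmem
            exact hkey ▸ hmax kv hkv (hkey ▸ hsend)
          have hm : m = p.1 := le_antisymm hmle hmge
          show (some p.2 : Option String) =
            match PySem.List.max? ms (fun s => s) with
            | some m => (d.find? (fun kv => kv.1 == m)).map (fun kv => kv.2)
            | none => default
          rw [hmx, hm]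
          simp [gd_find?_lookup d p hpre hpmem]
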